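-- pv_equiv track=rewrite | github.com/Magnusjensaas/ipcalc | calculations.py | calculate_first_host_address
-- ===== SOURCE A (Python) =====
-- reverse_CIDR_conversion = {"128.0.0.0": "1", "192.0.0.0": "2", "224.0.0.0": "3", "240.0.0.0": "4", "248.0.0.0": "5",
--                            "252.0.0.0": "6", "254.0.0.0": "7", "255.0.0.0": "8", "255.128.0.0": "9",
--                            "255.192.0.0": "10", "255.224.0.0": "11", "255.240.0.0": "12", "255.248.0.0": "13",
--                            "255.252.0.0": "14", "255.254.0.0": "15", "255.255.0.0": "16", "255.255.128.0": "17",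
--                            "255.255.192.0": "18", "255.255.224.0": "19", "255.255.240.0": "20", "255.255.248.0": "21",
--                            "255.255.252.0": "22", "255.255.254.0": "23", "255.255.255.0": "24", "255.255.255.128": "25",
--                            "255.255.255.192": "26", "255.255.255.224": "27", "255.255.255.240": "28",
--                            "255.255.255.248": "29", "255.255.255.252": "30", "255.255.255.254": "31",
--                            "255.255.255.255": "32"}
--
-- def convert_ip_to_binary(ip):
--     parts = [int(x) for x in ip.split(".")]
--
--     binary = []
--
--     for part in parts:
--         binary.append(bin(part))
--
--     return binary
--
-- def calculate_first_host_address(ip, mask):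
--     if len(mask) > 2:
--         mask = reverse_CIDR_conversion[mask]
--
--     host_bits = 32 - int(mask)
--
--     ip_in_binary = convert_ip_to_binary(ip)
--     binary_excluding_0b = []
--     for i in ip_in_binary:
--         binary_excluding_0b.append(i[2:])
--
--     full_length_binary = [i.zfill(8) for i in binary_excluding_0b]
--     binary_string = "".join(full_length_binary)
--     binary = binary_string[:int(mask)] + (host_bits - 1) * "0" + "1"
--
--     binary_list = [("0b" + binary[:8]), ("0b" + binary[8:16]),
--                    ("0b" + binary[16:24]), ("0b" + binary[24:32])]
--     return convert_binary_to_ip(binary_list)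
--
-- def convert_binary_to_ip(binary):
--     ip = []
--     for part in binary:
--         decimal = int(part, 2)
--         ip.append(str(decimal))
--
--     return ".".join(ip)
-- ===== SOURCE B (Python) =====
-- reverse_CIDR_conversion = {"128.0.0.0": "1", "192.0.0.0": "2", "224.0.0.0": "3", "240.0.0.0": "4", "248.0.0.0": "5",
--                            "252.0.0.0": "6", "254.0.0.0": "7", "255.0.0.0": "8", "255.128.0.0": "9",
--                            "255.192.0.0": "10", "255.224.0.0": "11", "255.240.0.0": "12", "255.248.0.0": "13",
--                            "255.252.0.0": "14", "255.254.0.0": "15", "255.255.0.0": "16", "255.255.128.0": "17",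
--                            "255.255.192.0": "18", "255.255.224.0": "19", "255.255.240.0": "20", "255.255.248.0": "21",
--                            "255.255.252.0": "22", "255.255.254.0": "23", "255.255.255.0": "24", "255.255.255.128": "25",
--                            "255.255.255.192": "26", "255.255.255.224": "27", "255.255.255.240": "28",
--                            "255.255.255.248": "29", "255.255.255.252": "30", "255.255.255.254": "31",
--                            "255.255.255.255": "32"}
--
--
-- def calculate_first_host_address(ip, mask):
--     # Pure integer arithmetic: no per-octet binary strings, no 32-char string surgery.
--     if len(mask) > 2:
--         mask = reverse_CIDR_conversion[mask]
--     host_bits = 32 - int(mask)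
--     n = 0
--     for part in ip.split("."):
--         n = n * 256 + int(part)
--     network = (n >> host_bits) << host_bits
--     result = network if host_bits == 0 else network + 1
--     return ".".join(str((result >> shift) & 255) for shift in (24, 16, 8, 0))
-- ===== Notes on version B (the rewrite author's own statement) =====
-- stated objective: simpler
-- what changed: B parses the IP into one 32-bit integer and computes the first host address with integer shift/mask arithmetic, replacing A's per-octet bin()/zfill string building and 33-character string surgery re-parsed with int(_, 2).
-- outside the precondition, e.g. on calculate_first_host_address('1.2.3.4', '40'): A returns '1.2.3.4', B raises ValueError; on calculate_first_host_address('1.2.3.4', '-1'): A returns '1.2.3.4', B returns '0.0.0.1'; on calculate_first_host_address('300.0.0.1', '24'): A returns '150.0.0.1', B returns '44.0.0.1'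
import Mathlib
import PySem

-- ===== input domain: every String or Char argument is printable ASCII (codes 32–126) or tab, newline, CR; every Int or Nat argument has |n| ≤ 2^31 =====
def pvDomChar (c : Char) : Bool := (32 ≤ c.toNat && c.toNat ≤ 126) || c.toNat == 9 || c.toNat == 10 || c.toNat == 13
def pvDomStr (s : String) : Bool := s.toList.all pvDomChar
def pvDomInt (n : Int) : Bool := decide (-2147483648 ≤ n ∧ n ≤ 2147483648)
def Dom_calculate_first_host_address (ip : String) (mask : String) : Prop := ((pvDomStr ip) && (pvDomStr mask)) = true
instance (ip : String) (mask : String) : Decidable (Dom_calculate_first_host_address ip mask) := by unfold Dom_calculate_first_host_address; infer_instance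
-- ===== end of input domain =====

-- B replaces A's per-octet binary-string surgery by pure integer arithmetic on the packed 32-bit address
-- (objective: simpler; return value only — neither version mutates its arguments).

-- ===== PORT A =====
-- module-level dict shared by both versions (identical literal in Source A and Source B)
def revCIDR : PySem.Dict String String := PySem.Dict.mk
  [("128.0.0.0", "1"), ("192.0.0.0", "2"), ("224.0.0.0", "3"), ("240.0.0.0", "4"), ("248.0.0.0", "5"),
   ("252.0.0.0", "6"), ("254.0.0.0", "7"), ("255.0.0.0", "8"), ("255.128.0.0", "9"),
   ("255.192.0.0", "10"), ("255.224.0.0", "11"), ("255.240.0.0", "12"), ("255.248.0.0", "13"),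
   ("255.252.0.0", "14"), ("255.254.0.0", "15"), ("255.255.0.0", "16"), ("255.255.128.0", "17"),
   ("255.255.192.0", "18"), ("255.255.224.0", "19"), ("255.255.240.0", "20"), ("255.255.248.0", "21"),
   ("255.255.252.0", "22"), ("255.255.254.0", "23"), ("255.255.255.0", "24"), ("255.255.255.128", "25"),
   ("255.255.255.192", "26"), ("255.255.255.224", "27"), ("255.255.255.240", "28"),
   ("255.255.255.248", "29"), ("255.255.255.252", "30"), ("255.255.255.254", "31"),
   ("255.255.255.255", "32")]

-- str values are carried as List Char (PySem.Chars is the exact model of Python str)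
def convert_ip_to_binary (ip : String) : List (List Char) :=
  let parts : List Int := (PySem.Chars.splitOn ip.toList ['.']).map (fun x => (PySem.Int.ofChars? x).getD 0)
  parts.foldl (fun acc part => acc ++ [PySem.Int.toBinChars0b part]) []

def convert_binary_to_ip (binary : List (List Char)) : List Char :=
  let ipl : List (List Char) := binary.foldl
    (fun acc part => acc ++ [PySem.Int.toChars ((PySem.Int.ofCharsBase? part 2).getD 0)]) []
  PySem.Chars.join ['.'] ipl

-- KeyError on the dict lookup and ValueError in int() are Python raises: the .getD defaults are
-- never reached inside Pre_ (those inputs are excluded there).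
def calculate_first_host_address (ip : String) (mask : String) : String :=
  let mask1 : String := if 2 < PySem.Str.len mask then (PySem.Dict.get? revCIDR mask).getD "" else mask
  let m : Int := (PySem.Int.ofStr? mask1).getD 0
  let host_bits : Int := 32 - m
  let ip_in_binary : List (List Char) := convert_ip_to_binary ip
  let binary_excluding_0b : List (List Char) :=
    ip_in_binary.foldl (fun acc i => acc ++ [PySem.List.slice i (some 2) none]) []
  let full_length_binary : List (List Char) := binary_excluding_0b.map (fun i => PySem.Chars.zfill i 8)
  let binary_string : List Char := PySem.Chars.join [] full_length_binary
  let binary : List Char := PySem.List.slice binary_string none (some m)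
      ++ PySem.List.pyRepeat ['0'] (host_bits - 1) ++ ['1']
  let binary_list : List (List Char) :=
    [ ['0', 'b'] ++ PySem.List.slice binary none (some 8)
    , ['0', 'b'] ++ PySem.List.slice binary (some 8) (some 16)
    , ['0', 'b'] ++ PySem.List.slice binary (some 16) (some 24)
    , ['0', 'b'] ++ PySem.List.slice binary (some 24) (some 32) ]
  String.ofList (convert_binary_to_ip binary_list)

-- ===== PORT B =====
-- Python's n >> k and n << k for k ≥ 0 are Int's >>> / <<< (exact); a negative shift count
-- (mask > 32) raises ValueError in Python and is outside Pre_.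
def calculate_first_host_address_alt (ip : String) (mask : String) : String :=
  let mask1 : String := if 2 < PySem.Str.len mask then (PySem.Dict.get? revCIDR mask).getD "" else mask
  let host_bits : Int := 32 - (PySem.Int.ofStr? mask1).getD 0
  let n : Int := (PySem.Chars.splitOn ip.toList ['.']).foldl
      (fun acc part => acc * 256 + (PySem.Int.ofChars? part).getD 0) 0
  let network : Int := (n >>> host_bits) <<< host_bits
  let result : Int := if host_bits == 0 then network else network + 1
  String.ofList (PySem.Chars.join ['.']
    ([(24:Int), (16:Int), (8:Int), (0:Int)].map (fun s => PySem.Int.toChars (PySem.Int.band (result >>> s) 255))))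

-- ===== PRECONDITION & SPEC =====
def pvOctetOK (s : List Char) : Bool :=
  match PySem.Int.ofChars? s with
  | some v => decide (0 ≤ v ∧ v ≤ 255)
  | none => false

def pvMaskNumOK (s : String) : Bool :=
  match PySem.Int.ofStr? s with
  | some v => decide (0 ≤ v ∧ v ≤ 32)
  | none => false

-- Pre_ is the task's natural domain: exactly four dot-separated octets each parsing (via int()) to 0..255,
-- and a mask that is either a key of reverse_CIDR_conversion or a short (≤ 2 chars) string parsing to 0..32.
-- Outside it A either raises (KeyError/ValueError) or returns accidental values of its string surgery
-- (wrong octet count, octets > 255, negative masks or masks 33..99) on which B's integer algorithm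
-- raises (negative shift) or returns a different value.
def Pre_calculate_first_host_address (ip : String) (mask : String) : Prop :=
  ((PySem.Chars.splitOn ip.toList ['.']).length = 4
    ∧ (PySem.Chars.splitOn ip.toList ['.']).all pvOctetOK = true)
  ∧ (if 2 < PySem.Str.len mask
      then (PySem.Dict.get? revCIDR mask).isSome = true
      else pvMaskNumOK mask = true)
instance (ip : String) (mask : String) : Decidable (Pre_calculate_first_host_address ip mask) := by
  unfold Pre_calculate_first_host_address; infer_instance

def pvWitness_calculate_first_host_address : String × String := ("10.0.0.1", "24")

def Spec_calculate_first_host_address (ip : String) (mask : String) (out : String) : Prop := out = calculate_first_host_address_alt ip mask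
instance (ip : String) (mask : String) (out : String) : Decidable (Spec_calculate_first_host_address ip mask out) := by unfold Spec_calculate_first_host_address; infer_instance

-- ===== CLAIM (what is proved, stated in full; the proofs are below) =====
def Claim_equal_calculate_first_host_address : Prop := ∀ (ip : String) (mask : String), Dom_calculate_first_host_address ip mask → Pre_calculate_first_host_address ip mask → Spec_calculate_first_host_address ip mask (calculate_first_host_address ip mask)

-- ===== LEMMAS AND PROOFS =====

-- big-endian k-bit binary string of n % 2^k, exactly the shape A builds by hand
def toBits : Nat → Nat → List Char
  | 0, _ => []
  | k+1, n => toBits k (n / 2) ++ [if n % 2 == 1 then '1' else '0']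

theorem length_toBits (k n : Nat) : (toBits k n).length = k := by
  induction k generalizing n with
  | zero => rfl
  | succ k ih => simp [toBits, ih]

theorem toBits_zero_val (k : Nat) : toBits k 0 = List.replicate k '0' := by
  induction k with
  | zero => rfl
  | succ k ih => simpa [toBits, List.replicate_succ'] using ih

theorem toBits_one (k : Nat) (h : 1 ≤ k) :
    toBits k 1 = List.replicate (k - 1) '0' ++ ['1'] := by
  obtain ⟨j, rfl⟩ : ∃ j, k = j + 1 := ⟨k - 1, by omega⟩
  simp [toBits, toBits_zero_val]

set_option maxRecDepth 40000 in
theorem octet_toBits : ∀ q : Nat, q < 256 →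
    PySem.Chars.zfill (PySem.List.slice (PySem.Int.toBinChars0b (q : Int)) (some 2) none) 8 = toBits 8 q := by
  decide

set_option maxRecDepth 40000 in
theorem parse_toBits : ∀ q : Nat, q < 256 →
    PySem.Int.ofCharsBase? ('0' :: 'b' :: toBits 8 q) 2 = some (q : Int) := by
  decide


def pvPack (q0 q1 q2 q3 : Nat) : Nat := ((q0*256+q1)*256+q2)*256+q3
def pvHost (N mN : Nat) : Nat := if mN = 32 then N else N / 2^(32-mN) * 2^(32-mN) + 1
def pvIpStr (R : Nat) : List Char := PySem.Chars.join ['.']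
  [PySem.Int.toChars ((R/2^24 % 256 : Nat) : Int), PySem.Int.toChars ((R/2^16 % 256 : Nat) : Int),
   PySem.Int.toChars ((R/2^8 % 256 : Nat) : Int), PySem.Int.toChars ((R % 256 : Nat) : Int)]

theorem shift_cast (R h : Nat) : (((R:Int) >>> ((h:Nat):Int)) <<< ((h:Nat):Int)) = ((R / 2^h * 2^h : Nat) : Int) := by
  rw [Int.shiftRight_natCast_right]
  have h1 : ((R:Int) >>> h) = ((R >>> h : Nat):Int) := by
    simp [Int.shiftRight_eq_div_pow, Nat.shiftRight_eq_div_pow]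
  rw [h1, Int.shiftLeft_natCast_right]
  have h2 : (((R >>> h : Nat):Int) <<< h) = (((R >>> h) <<< h : Nat) : Int) := by
    simp [Int.shiftLeft_eq, Nat.shiftLeft_eq]
  rw [h2, Nat.shiftRight_eq_div_pow, Nat.shiftLeft_eq]

theorem byte_cast (R : Nat) (s : Int) (hs : 0 ≤ s) :
    PySem.Int.band ((R:Int) >>> s) 255 = ((R / 2^s.toNat % 256 : Nat) : Int) := by
  obtain ⟨k, rfl⟩ : ∃ k : Nat, s = (k : Int) := ⟨s.toNat, by omega⟩
  rw [Int.shiftRight_natCast_right]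
  have h1 : ((R:Int) >>> k) = ((R >>> k : Nat):Int) := by
    simp [Int.shiftRight_eq_div_pow, Nat.shiftRight_eq_div_pow]
  rw [h1, PySem.Int.band_of_nonneg (by positivity) (by norm_num)]
  have h3 : ((R >>> k : Nat) : Int).toNat = R >>> k := by
    generalize R >>> k = t; omega
  have h4 : (255 : Int).toNat = 255 := by decide
  rw [h3, h4]
  have h5 := Nat.and_two_pow_sub_one_eq_mod (R >>> k) 8
  norm_num at h5
  rw [h5, Nat.shiftRight_eq_div_pow]
  have h6 : ((k:Int)).toNat = k := by omega
  rw [h6]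

theorem B_eval (ip mask : String) (s0 s1 s2 s3 : List Char) (q0 q1 q2 q3 mN : Nat)
 (hsplit : PySem.Chars.splitOn ip.toList ['.'] = [s0,s1,s2,s3])
 (h0 : PySem.Int.ofChars? s0 = some (q0:Int)) (h1 : PySem.Int.ofChars? s1 = some (q1:Int))
 (h2 : PySem.Int.ofChars? s2 = some (q2:Int)) (h3 : PySem.Int.ofChars? s3 = some (q3:Int))
 (hm : PySem.Int.ofStr? (if 2 < PySem.Str.len mask then (PySem.Dict.get? revCIDR mask).getD "" else mask) = some (mN : Int))
 (hmle : mN ≤ 32) :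
 calculate_first_host_address_alt ip mask = String.ofList (pvIpStr (pvHost (pvPack q0 q1 q2 q3) mN)) := by
  simp only [calculate_first_host_address_alt, hsplit, hm, h0, h1, h2, h3, Option.getD_some,
    List.foldl, List.map]
  have hN : ((((0:Int) * 256 + ↑q0) * 256 + ↑q1) * 256 + ↑q2) * 256 + ↑q3 = ((pvPack q0 q1 q2 q3 : Nat) : Int) := by
    unfold pvPack; push_cast; ring
  rw [hN]
  have h32 : (32:Int) - ↑mN = ((32 - mN : Nat) : Int) := by omega
  rw [h32, shift_cast]
  by_cases hm32 : mN = 32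
  · subst hm32
    norm_num
    rw [byte_cast _ _ (by norm_num), byte_cast _ _ (by norm_num), byte_cast _ _ (by norm_num),
        byte_cast _ _ (by norm_num)]
    unfold pvHost pvIpStr
    have e24 : Int.toNat 24 = 24 := rfl
    have e16 : Int.toNat 16 = 16 := rfl
    have e8 : Int.toNat 8 = 8 := rfl
    rw [e24, e16, e8]
    norm_num
  · have hcond : (((32 - mN : Nat) : Int) == 0) = false := by
      simp only [beq_eq_false_iff_ne, ne_eq]
      omega
    rw [hcond]
    simp only [Bool.false_eq_true, if_false]
    have hres : ((pvPack q0 q1 q2 q3 / 2 ^ (32 - mN) * 2 ^ (32 - mN) : Nat) : Int) + 1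
        = ((pvHost (pvPack q0 q1 q2 q3) mN : Nat) : Int) := by
      unfold pvHost; rw [if_neg hm32]; push_cast; ring
    rw [hres]
    rw [byte_cast _ _ (by norm_num), byte_cast _ _ (by norm_num), byte_cast _ _ (by norm_num),
        byte_cast _ _ (by norm_num)]
    unfold pvIpStr
    have e24 : Int.toNat 24 = 24 := rfl
    have e16 : Int.toNat 16 = 16 := rfl
    have e8 : Int.toNat 8 = 8 := rfl
    rw [e24, e16, e8]
    norm_num

theorem toBits_split' (j k n : Nat) :
    toBits (k + j) n = toBits k (n / 2 ^ j) ++ toBits j (n % 2 ^ j) := by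
  induction j generalizing n with
  | zero => simp [toBits]
  | succ j ih =>
    have ha : n / 2 / 2 ^ j = n / 2 ^ (j + 1) := by
      rw [Nat.div_div_eq_div_mul, pow_succ']
    have hb : n / 2 % 2 ^ j = n % 2 ^ (j + 1) / 2 := by
      rw [pow_succ', Nat.mod_mul_right_div_self]
    have hc : n % 2 ^ (j + 1) % 2 = n % 2 := by
      rw [Nat.mod_mod_of_dvd _ (dvd_pow_self 2 (Nat.succ_ne_zero j))]
    show toBits ((k + j) + 1) n = _
    rw [show toBits ((k+j)+1) n = toBits (k+j) (n / 2) ++ [if n % 2 == 1 then '1' else '0'] from rfl]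
    rw [ih, ha, hb]
    rw [show toBits (j+1) (n % 2 ^ (j+1)) = toBits j (n % 2^(j+1) / 2) ++ [if n % 2^(j+1) % 2 == 1 then '1' else '0'] from rfl]
    rw [hc, List.append_assoc]

theorem toBits_mod (k n : Nat) : toBits k n = toBits k (n % 2 ^ k) := by
  have h := toBits_split' k 0 n
  simpa [toBits] using h

theorem pack_toBits (q0 q1 q2 q3 : Nat) (_hq0 : q0 < 256) (hq1 : q1 < 256) (hq2 : q2 < 256) (hq3 : q3 < 256) :
    toBits 8 q0 ++ (toBits 8 q1 ++ (toBits 8 q2 ++ toBits 8 q3)) = toBits 32 (pvPack q0 q1 q2 q3) := by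
  have h1 := toBits_split' 8 24 (pvPack q0 q1 q2 q3)
  have h2 := toBits_split' 8 16 (pvPack q0 q1 q2 q3 / 2 ^ 8)
  have h3 := toBits_split' 8 8 (pvPack q0 q1 q2 q3 / 2 ^ 8 / 2 ^ 8)
  norm_num at h1 h2 h3
  have e1 : pvPack q0 q1 q2 q3 % 256 = q3 := by unfold pvPack; omega
  have e2 : pvPack q0 q1 q2 q3 / 256 % 256 = q2 := by unfold pvPack; omega
  have e3 : pvPack q0 q1 q2 q3 / 256 / 256 % 256 = q1 := by unfold pvPack; omega
  have e4 : pvPack q0 q1 q2 q3 / 256 / 256 / 256 = q0 := by unfold pvPack; omega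
  rw [h1, h2, h3, e1, e2, e3, e4]
  simp [List.append_assoc]

theorem toBits32_chunks (R : Nat) (t : List Char) :
    toBits 32 R ++ t = toBits 8 (R / 2^24 % 256) ++ (toBits 8 (R / 2^16 % 256) ++ (toBits 8 (R / 2^8 % 256) ++ (toBits 8 (R % 256) ++ t))) := by
  have h1 := toBits_split' 8 24 R
  have h2 := toBits_split' 8 16 (R / 2 ^ 8)
  have h3 := toBits_split' 8 8 (R / 2 ^ 8 / 2 ^ 8)
  norm_num at h1 h2 h3
  have hm := toBits_mod 8 (R / 256 / 256 / 256)
  norm_num at hm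
  have e1 : R / 256 / 256 = R / 2^16 := by omega
  have e2 : R / 256 / 256 / 256 = R / 2^24 := by omega
  have e3 : (2:Nat)^8 = 256 := by norm_num
  rw [h1, h2, h3, hm, e1]
  have e4 : R / 2 ^ 16 / 256 % 256 = R / 2 ^ 24 % 256 := by omega
  have e5 : R / 256 % 256 = R / 2 ^ 8 % 256 := by omega
  rw [e4, e5]
  simp [List.append_assoc]

theorem chunksOf (R : Nat) (t : List Char) :
    PySem.List.slice (toBits 32 R ++ t) none (some 8) = toBits 8 (R/2^24 % 256) ∧
    PySem.List.slice (toBits 32 R ++ t) (some 8) (some 16) = toBits 8 (R/2^16 % 256) ∧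
    PySem.List.slice (toBits 32 R ++ t) (some 16) (some 24) = toBits 8 (R/2^8 % 256) ∧
    PySem.List.slice (toBits 32 R ++ t) (some 24) (some 32) = toBits 8 (R % 256) := by
  rw [toBits32_chunks R t]
  set b0 := toBits 8 (R/2^24 % 256) with hb0
  set b1 := toBits 8 (R/2^16 % 256) with hb1
  set b2 := toBits 8 (R/2^8 % 256) with hb2
  set b3 := toBits 8 (R % 256) with hb3
  set L : List Char := b0 ++ (b1 ++ (b2 ++ (b3 ++ t))) with hL
  have l0 : b0.length = 8 := length_toBits _ _
  have l1 : b1.length = 8 := length_toBits _ _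
  have l2 : b2.length = 8 := length_toBits _ _
  have l3 : b3.length = 8 := length_toBits _ _
  refine ⟨?_, ?_, ?_, ?_⟩
  · rw [PySem.List.slice_to (xs := L) (b := 8) (by norm_num),
        show ((8:Int)).toNat = 8 from rfl, hL]
    exact List.take_left' l0
  · rw [PySem.List.slice_toNat (xs := L) (a := 8) (b := 16) (by norm_num) (by norm_num),
        show ((8:Int)).toNat = 8 from rfl, show ((16:Int)).toNat = 16 from rfl, hL]
    rw [List.drop_left' l0]
    norm_num
    exact List.take_left' l1
  · rw [PySem.List.slice_toNat (xs := L) (a := 16) (b := 24) (by norm_num) (by norm_num),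
        show ((16:Int)).toNat = 16 from rfl, show ((24:Int)).toNat = 24 from rfl, hL]
    rw [← List.append_assoc]
    have h16 : (b0 ++ b1).length = 16 := by simp [l0, l1]
    rw [List.drop_left' h16]
    norm_num
    exact List.take_left' l2
  · rw [PySem.List.slice_toNat (xs := L) (a := 24) (b := 32) (by norm_num) (by norm_num),
        show ((24:Int)).toNat = 24 from rfl, show ((32:Int)).toNat = 32 from rfl, hL]
    rw [← List.append_assoc, ← List.append_assoc]
    have h24 : ((b0 ++ b1) ++ b2).length = 24 := by simp [l0, l1, l2]
    rw [List.drop_left' h24]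
    norm_num
    exact List.take_left' l3

theorem A_eval (ip mask : String) (s0 s1 s2 s3 : List Char) (q0 q1 q2 q3 mN : Nat)
 (hsplit : PySem.Chars.splitOn ip.toList ['.'] = [s0,s1,s2,s3])
 (h0 : PySem.Int.ofChars? s0 = some (q0:Int)) (h1 : PySem.Int.ofChars? s1 = some (q1:Int))
 (h2 : PySem.Int.ofChars? s2 = some (q2:Int)) (h3 : PySem.Int.ofChars? s3 = some (q3:Int))
 (hq0 : q0 < 256) (hq1 : q1 < 256) (hq2 : q2 < 256) (hq3 : q3 < 256)
 (hm : PySem.Int.ofStr? (if 2 < PySem.Str.len mask then (PySem.Dict.get? revCIDR mask).getD "" else mask) = some (mN : Int))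
 (hmle : mN ≤ 32) :
 calculate_first_host_address ip mask = String.ofList (pvIpStr (pvHost (pvPack q0 q1 q2 q3) mN)) := by
  simp only [calculate_first_host_address, convert_ip_to_binary, convert_binary_to_ip,
    hsplit, hm, h0, h1, h2, h3, Option.getD_some, List.map, List.foldl,
    List.nil_append, List.cons_append]
  rw [octet_toBits q0 hq0, octet_toBits q1 hq1, octet_toBits q2 hq2, octet_toBits q3 hq3]
  rw [show PySem.Chars.join [] [toBits 8 q0, toBits 8 q1, toBits 8 q2, toBits 8 q3]
      = toBits 8 q0 ++ (toBits 8 q1 ++ (toBits 8 q2 ++ toBits 8 q3)) by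
        simp [PySem.Chars.join, List.intercalate]]
  rw [pack_toBits q0 q1 q2 q3 hq0 hq1 hq2 hq3]
  set P := pvPack q0 q1 q2 q3 with hP
  by_cases hm32 : mN = 32
  · subst hm32
    rw [PySem.List.slice_to_natCast]
    rw [List.take_of_length_le (by rw [length_toBits])]
    rw [PySem.List.pyRepeat_singleton]
    rw [show (((32:Int)) - ((32:Nat):Int) - 1).toNat = 0 by norm_num]
    norm_num
    obtain ⟨c0, c1, c2, c3⟩ := chunksOf P ['1']
    rw [c0, c1, c2, c3]
    rw [parse_toBits _ (Nat.mod_lt _ (by norm_num)), parse_toBits _ (Nat.mod_lt _ (by norm_num)),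
        parse_toBits _ (Nat.mod_lt _ (by norm_num)), parse_toBits _ (Nat.mod_lt _ (by norm_num))]
    unfold pvHost pvIpStr
    norm_num
  · have hh : 1 ≤ 32 - mN := by omega
    rw [PySem.List.slice_to_natCast]
    rw [PySem.List.pyRepeat_singleton]
    have htn : ((32:Int) - ((mN:Nat):Int) - 1).toNat = 32 - mN - 1 := by omega
    rw [htn]
    have hsp := toBits_split' (32-mN) mN P
    rw [show mN + (32-mN) = 32 by omega] at hsp
    have htake : (toBits 32 P).take mN = toBits mN (P / 2^(32-mN)) := by
      rw [hsp]; exact List.take_left' (length_toBits _ _)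
    rw [htake]
    rw [List.append_assoc]
    rw [show List.replicate (32-mN-1) '0' ++ ['1'] = toBits (32-mN) 1 from (toBits_one _ hh).symm]
    have hone : 1 < 2^(32-mN) := Nat.one_lt_two_pow_iff.mpr (by omega)
    have hc := toBits_split' (32-mN) mN (P / 2^(32-mN) * 2^(32-mN) + 1)
    rw [show mN + (32-mN) = 32 by omega] at hc
    have ed : (P / 2^(32-mN) * 2^(32-mN) + 1) / 2^(32-mN) = P / 2^(32-mN) := by
      rw [mul_comm (P / 2^(32-mN)) (2^(32-mN))]
      rw [Nat.mul_add_div (by positivity)]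
      simp [Nat.div_eq_of_lt hone]
    have em : (P / 2^(32-mN) * 2^(32-mN) + 1) % 2^(32-mN) = 1 := by
      rw [mul_comm (P / 2^(32-mN)) (2^(32-mN)), Nat.mul_add_mod]
      exact Nat.mod_eq_of_lt hone
    rw [ed, em] at hc
    rw [← hc]
    rw [show toBits 32 (P / 2^(32-mN) * 2^(32-mN) + 1)
        = toBits 32 (P / 2^(32-mN) * 2^(32-mN) + 1) ++ [] from (List.append_nil _).symm]
    obtain ⟨c0, c1, c2, c3⟩ := chunksOf (P / 2^(32-mN) * 2^(32-mN) + 1) []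
    rw [c0, c1, c2, c3]
    rw [parse_toBits _ (Nat.mod_lt _ (by norm_num)), parse_toBits _ (Nat.mod_lt _ (by norm_num)),
        parse_toBits _ (Nat.mod_lt _ (by norm_num)), parse_toBits _ (Nat.mod_lt _ (by norm_num))]
    unfold pvHost pvIpStr
    rw [if_neg hm32]
    norm_num


theorem pvOctetOK_spec (s : List Char) (h : pvOctetOK s = true) :
    ∃ q : Nat, PySem.Int.ofChars? s = some (q : Int) ∧ q < 256 := by
  unfold pvOctetOK at h
  cases hc : PySem.Int.ofChars? s with
  | none => rw [hc] at h; simp at h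
  | some v =>
    rw [hc] at h
    simp only [decide_eq_true_eq] at h
    exact ⟨v.toNat, by congr 1; omega, by omega⟩

theorem dict_values (mask v : String) (h : PySem.Dict.get? revCIDR mask = some v) :
    ∃ m : Nat, PySem.Int.ofStr? v = some (m : Int) ∧ m ≤ 32 := by
  unfold PySem.Dict.get? at h
  obtain ⟨p, hfind, hv⟩ := Option.map_eq_some_iff.mp h
  have hmem : p ∈ revCIDR.items := List.mem_of_find?_eq_some hfind
  have key : ∀ q ∈ revCIDR.items,
      (decide (PySem.Int.ofStr? q.2 = some ((((PySem.Int.ofStr? q.2).getD 0).toNat : Nat) : Int))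
        && decide (((PySem.Int.ofStr? q.2).getD 0).toNat ≤ 32)) = true := by decide
  have hk := key p hmem
  simp only [Bool.and_eq_true, decide_eq_true_eq] at hk
  exact ⟨((PySem.Int.ofStr? p.2).getD 0).toNat, by rw [← hv]; exact hk.1, hk.2⟩

-- ===== VERDICT (by name: the statement is the Claim_ definition above) =====
theorem calculate_first_host_address_spec : Claim_equal_calculate_first_host_address := by
  intro ip mask _hdom hpre
  unfold Spec_calculate_first_host_address
  obtain ⟨⟨hlen, hall⟩, hmask⟩ := hpre
  obtain ⟨s0, s1, s2, s3, hsplit⟩ := List.length_eq_four.mp hlen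
  rw [hsplit] at hall
  simp only [List.all_cons, List.all_nil, Bool.and_true, Bool.and_eq_true] at hall
  obtain ⟨k0, k1, k2, k3⟩ := hall
  obtain ⟨q0, e0, b0⟩ := pvOctetOK_spec s0 k0
  obtain ⟨q1, e1, b1⟩ := pvOctetOK_spec s1 k1
  obtain ⟨q2, e2, b2⟩ := pvOctetOK_spec s2 k2
  obtain ⟨q3, e3, b3⟩ := pvOctetOK_spec s3 k3
  have hmres : ∃ mN : Nat, PySem.Int.ofStr? (if 2 < PySem.Str.len mask then (PySem.Dict.get? revCIDR mask).getD "" else mask) = some (mN:Int) ∧ mN ≤ 32 := by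
    by_cases hlenm : 2 < PySem.Str.len mask
    · rw [if_pos hlenm] at hmask ⊢
      obtain ⟨v, hv⟩ := Option.isSome_iff_exists.mp hmask
      rw [hv]
      simpa using dict_values mask v hv
    · rw [if_neg hlenm] at hmask ⊢
      unfold pvMaskNumOK at hmask
      cases hc : PySem.Int.ofStr? mask with
      | none => rw [hc] at hmask; simp at hmask
      | some v =>
        rw [hc] at hmask
        simp only [decide_eq_true_eq] at hmask
        exact ⟨v.toNat, by congr 1; omega, by omega⟩
  obtain ⟨mN, hm, hmle⟩ := hmres
  rw [A_eval ip mask s0 s1 s2 s3 q0 q1 q2 q3 mN hsplit e0 e1 e2 e3 b0 b1 b2 b3 hm hmle,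
      B_eval ip mask s0 s1 s2 s3 q0 q1 q2 q3 mN hsplit e0 e1 e2 e3 hm hmle]
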